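-- pv_equiv track=rewrite | github.com/sujungeee/python-programmers | 1회차/38-1.py | solution
-- ===== SOURCE A (Python) =====
-- from collections import defaultdict
--
-- def solution(graph, start):
--     adj_list= defaultdict(list)
--     for u, v in graph: # u 노드로부터 갈 수 있는 v들을 값으로 한 딕셔너리를 생성
--         adj_list[u].append(v)
--
--     def dfs(node, visited, result):
--         stack= [node]
--         while stack:
--             vNode= stack.pop()
--             if vNode in visited:
--                 continue
--             else:
--                 visited.add(vNode)
--                 result.append(vNode) # 방문한 노드는 탐색이 완료된 노드
--                 adj_node= adj_list[vNode]
--                 for i in range(len(adj_node)-1, -1,-1):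
--                     stack.append(adj_node[i])
--         return result
--
--     visited= set()
--     result= [] # 깊이 우선 탐색의 경로
--     dfs(start, visited, result)
--
--     return result
-- ===== SOURCE B (Python) =====
-- def solution(graph, start):
--     result = []
--
--     def dfs(node):
--         if node in result:
--             return
--         result.append(node)
--         for u, v in graph:
--             if u == node:
--                 dfs(v)
--
--     dfs(start)
--     return result
-- ===== Notes on version B (the rewrite author's own statement) =====
-- stated objective: simpler
-- what changed: The defaultdict adjacency list, the visited set and the explicit reverse-push stack are all dropped: B is a short recursive DFS that uses the result list itself as the visited record and finds each node's neighbours by scanning the edge list directly (for u,v in graph: if u == node: dfs(v)), which preserves A's forward neighbour order and hence its exact preorder.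
import Mathlib
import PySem

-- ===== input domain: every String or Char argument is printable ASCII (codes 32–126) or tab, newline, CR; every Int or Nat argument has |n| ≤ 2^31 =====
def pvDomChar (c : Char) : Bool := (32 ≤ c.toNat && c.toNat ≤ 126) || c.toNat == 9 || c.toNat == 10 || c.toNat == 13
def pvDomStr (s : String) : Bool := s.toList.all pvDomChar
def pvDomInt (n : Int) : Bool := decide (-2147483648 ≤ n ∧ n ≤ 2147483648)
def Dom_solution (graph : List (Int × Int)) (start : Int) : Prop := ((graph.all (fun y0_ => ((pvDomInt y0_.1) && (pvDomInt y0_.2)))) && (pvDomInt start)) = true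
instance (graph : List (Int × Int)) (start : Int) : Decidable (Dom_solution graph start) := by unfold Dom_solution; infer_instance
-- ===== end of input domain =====

-- B drops the adjacency dict, the visited set and the explicit stack: a short recursive
-- DFS using the result list as the visited record and scanning the edge list for
-- neighbours; same preorder, objective: simpler.


-- ===== PORT A =====
-- adj_list = defaultdict(list); for u, v in graph: adj_list[u].append(v)
-- (d[u].append(v) on a defaultdict(list) is exactly Dict.modify u [] (· ++ [v]))
def buildAdj (graph : List (Int × Int)) : PySem.Dict Int (List Int) :=
  graph.foldl (fun d uv => d.modify uv.1 [] (fun l => l ++ [uv.2])) PySem.Dict.empty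

-- A's while-loop over the stack; the stack is modelled head-on-top, so Python's
-- reversed push of adj_node puts 'adj ++ rest' on the stack.  The Nat argument is
-- pure fuel making the loop total; graph.length + 2 is proved sufficient below
-- (loopA_suff), so the 'none' branch is unreachable.  Inside dfs, Python's
-- 'adj_list[vNode]' on a defaultdict only ever adds empty entries, which never
-- changes any later lookup, so 'getD _ []' is exact.
def loopA (adj : PySem.Dict Int (List Int)) :
    Nat → PySem.Set Int × List Int → List Int → Option (PySem.Set Int × List Int)
  | 0, _, _ => none
  | _ + 1, (v, r), [] => some (v, r)
  | f + 1, (v, r), x :: rest =>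
    if x ∈ v then loopA adj f (v, r) rest
    else loopA adj f (PySem.Set.add v x, r ++ [x]) (adj.getD x [] ++ rest)

def solution (graph : List (Int × Int)) (start : Int) : List Int :=
  match loopA (buildAdj graph) (graph.length + 2) (PySem.Set.empty, []) [start] with
  | some (_, r) => r
  | none => []

-- ===== PORT B =====
-- def dfs(node): if node in result: return; result.append(node);
-- for u, v in graph: if u == node: dfs(v).  The mutated result list is threaded as
-- state; the for-loop over the edge list is a foldl whose branch recurses only on
-- edges leaving the current node.  Fuel (graph.length + 2 bounds the recursion
-- depth, proved in dfsB_suff) makes it total, the 'none' branch being unreachable.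
def dfsB : Nat → List (Int × Int) → Int → List Int → Option (List Int)
  | 0, _, _, _ => none
  | f + 1, g, x, r =>
    if x ∈ r then some r
    else g.foldl
      (fun acc e => if e.1 == x then acc.bind (fun r' => dfsB f g e.2 r') else acc)
      (some (r ++ [x]))

def solution_alt (graph : List (Int × Int)) (start : Int) : List Int :=
  match dfsB (graph.length + 2) graph start [] with
  | some r => r
  | none => []

-- ===== PRECONDITION & SPEC =====
def Spec_solution (graph : List (Int × Int)) (start : Int) (out : List Int) : Prop := out = solution_alt graph start
instance (graph : List (Int × Int)) (start : Int) (out : List Int) : Decidable (Spec_solution graph start out) := by unfold Spec_solution; infer_instance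

-- ===== CLAIM (what is proved, stated in full; the proofs are below) =====
def Claim_equal_solution : Prop := ∀ (graph : List (Int × Int)) (start : Int), Dom_solution graph start → Spec_solution graph start (solution graph start)

-- ===== LEMMAS AND PROOFS =====

-- B's edge loop, restated over the list of neighbours of x (the mapped filter)
def nbB (g : List (Int × Int)) (f : Nat) (l : List Int) (o : Option (List Int)) :
    Option (List Int) :=
  l.foldl (fun acc y => acc.bind (fun r => dfsB f g y r)) o

theorem dfsB_succ (g : List (Int × Int)) (f : Nat) (x : Int) (r : List Int) :
    dfsB (f + 1) g x r =
      if x ∈ r then some r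
      else nbB g f ((g.filter (fun e => e.1 == x)).map Prod.snd) (some (r ++ [x])) := by
  rw [show dfsB (f + 1) g x r = (if x ∈ r then some r
      else g.foldl (fun acc e => if e.1 == x then acc.bind (fun r' => dfsB f g e.2 r') else acc)
        (some (r ++ [x]))) from rfl]
  by_cases hx : x ∈ r
  · simp [hx]
  · simp only [hx, if_false]
    rw [nbB, List.foldl_map, ← List.foldl_filter]

theorem nbB_nil (g : List (Int × Int)) (f : Nat) (o : Option (List Int)) :
    nbB g f [] o = o := rfl

theorem nbB_cons (g : List (Int × Int)) (f : Nat) (y : Int) (ys : List Int)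
    (o : Option (List Int)) :
    nbB g f (y :: ys) o = nbB g f ys (o.bind (fun r => dfsB f g y r)) := rfl

theorem nbB_none (g : List (Int × Int)) (f : Nat) (l : List Int) :
    nbB g f l none = none := by
  induction l with
  | nil => rfl
  | cons y ys ih => simpa [nbB_cons] using ih

theorem nbB_append (g : List (Int × Int)) (f : Nat) (l₁ l₂ : List Int)
    (o : Option (List Int)) :
    nbB g f (l₁ ++ l₂) o = nbB g f l₂ (nbB g f l₁ o) := by
  simp [nbB, List.foldl_append]

-- characterisation of the adjacency dictionary A builds: exactly B's neighbour scan
theorem buildAdj_getD (graph : List (Int × Int)) (u : Int) :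
    (buildAdj graph).getD u [] = (graph.filter (fun e => e.1 == u)).map Prod.snd := by
  suffices h : ∀ (g : List (Int × Int)) (d : PySem.Dict Int (List Int)),
      (g.foldl (fun d uv => d.modify uv.1 [] (fun l => l ++ [uv.2])) d).getD u [] =
        d.getD u [] ++ (g.filter (fun e => e.1 == u)).map Prod.snd by
    simpa [buildAdj, PySem.Dict.getD_empty] using h graph PySem.Dict.empty
  intro g
  induction g with
  | nil => simp
  | cons e t ih =>
    intro d
    rw [List.foldl_cons, ih]
    by_cases hu : e.1 = u
    · simp [hu]
    · simp [hu, PySem.Dict.getD_modify, Ne.symm hu]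

-- fuel monotonicity of B's recursion
theorem dfsB_mono (g : List (Int × Int)) :
    ∀ (f : Nat) (x : Int) (r r' : List Int),
      dfsB f g x r = some r' → dfsB (f + 1) g x r = some r' := by
  intro f
  induction f with
  | zero => intro x r r' h; simp [dfsB] at h
  | succ f ih =>
    have hnb : ∀ (l : List Int) (r r' : List Int),
        nbB g f l (some r) = some r' → nbB g (f + 1) l (some r) = some r' := by
      intro l
      induction l with
      | nil => intro r r' h; simpa [nbB_nil] using h
      | cons y ys ihl =>
        intro r r' h
        rw [nbB_cons] at h ⊢
        simp only [Option.bind_some] at h ⊢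
        rcases hm : dfsB f g y r with _ | m
        · rw [hm, nbB_none] at h; exact absurd h (by simp)
        · rw [hm] at h
          rw [ih y r m hm]
          exact ihl m r' h
    intro x r r' h
    rw [dfsB_succ] at h
    rw [dfsB_succ]
    by_cases hx : x ∈ r
    · simpa [hx] using h
    · rw [if_neg hx] at h ⊢; exact hnb _ _ _ h

theorem nbB_mono (g : List (Int × Int)) (f : Nat) (l : List Int) (r r' : List Int) :
    nbB g f l (some r) = some r' → nbB g (f + 1) l (some r) = some r' := by
  induction l generalizing r with
  | nil => intro h; simpa [nbB_nil] using h
  | cons y ys ihl =>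
    intro h
    rw [nbB_cons] at h ⊢
    simp only [Option.bind_some] at h ⊢
    rcases hm : dfsB f g y r with _ | m
    · rw [hm, nbB_none] at h; exact absurd h (by simp)
    · rw [hm] at h
      rw [dfsB_mono g f y r m hm]
      exact ihl m h

-- A's loop agrees with B's recursion wherever both return; the invariant says the
-- visited set and the result list contain the same nodes
theorem bridge (graph : List (Int × Int)) :
    ∀ (fA : Nat) (v : PySem.Set Int) (r stack : List Int)
      (fB : Nat) (outA : PySem.Set Int × List Int) (outB : List Int),
      (∀ z : Int, z ∈ v ↔ z ∈ r) →
      loopA (buildAdj graph) fA (v, r) stack = some outA →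
      nbB graph fB stack (some r) = some outB →
      outA.2 = outB := by
  intro fA
  induction fA with
  | zero => intro v r stack fB outA outB _ hA _; simp [loopA] at hA
  | succ fA ih =>
    intro v r stack fB outA outB hinv hA hB
    cases stack with
    | nil =>
      simp only [loopA] at hA
      rw [nbB_nil] at hB
      rw [← Option.some_inj.mp hA, Option.some_inj.mp hB]
    | cons x rest =>
      simp only [loopA] at hA
      by_cases hx : x ∈ v
      · rw [if_pos hx] at hA
        rw [nbB_cons] at hB
        simp only [Option.bind_some] at hB
        cases fB with
        | zero => rw [show dfsB 0 graph x r = none from rfl, nbB_none] at hB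
                  exact absurd hB (by simp)
        | succ g =>
          rw [dfsB_succ, if_pos ((hinv x).mp hx)] at hB
          exact ih v r rest (g + 1) outA outB hinv hA hB
      · rw [if_neg hx] at hA
        rw [nbB_cons] at hB
        simp only [Option.bind_some] at hB
        cases fB with
        | zero => rw [show dfsB 0 graph x r = none from rfl, nbB_none] at hB
                  exact absurd hB (by simp)
        | succ g =>
          rw [dfsB_succ, if_neg (fun h => hx ((hinv x).mpr h))] at hB
          rcases hm : nbB graph g ((graph.filter (fun e => e.1 == x)).map Prod.snd)
              (some (r ++ [x])) with _ | m
          · rw [hm, nbB_none] at hB; exact absurd hB (by simp)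
          · rw [hm] at hB
            have hm' : nbB graph (g + 1) ((graph.filter (fun e => e.1 == x)).map Prod.snd)
                (some (r ++ [x])) = some m := nbB_mono graph g _ _ _ hm
            have hcomb : nbB graph (g + 1)
                ((buildAdj graph).getD x [] ++ rest) (some (r ++ [x])) = some outB := by
              rw [buildAdj_getD, nbB_append, hm', hB]
            have hinv' : ∀ z : Int, z ∈ PySem.Set.add v x ↔ z ∈ r ++ [x] := by
              intro z
              simp [PySem.Set.mem_add, hinv z]
            exact ih _ _ _ (g + 1) outA outB hinv' hA hcomb

-- counting lemma for A's fuel bound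
theorem filter_visit_count (graph : List (Int × Int)) (v : PySem.Set Int) (x : Int) (hx : x ∉ v) :
    (graph.filter (fun e => decide (e.1 ∉ PySem.Set.add v x))).length
      + (graph.filter (fun e => e.1 == x)).length
      = (graph.filter (fun e => decide (e.1 ∉ v))).length := by
  induction graph with
  | nil => simp
  | cons e t ih =>
    have hgoal := ih
    by_cases hex : e.1 = x
    · have hev : e.1 ∉ v := fun h => hx (hex ▸ h)
      simp [hex, hx] at hgoal ⊢
      omega
    · by_cases hev : e.1 ∈ v
      · simp [PySem.Set.mem_add, hex, hev] at hgoal ⊢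
        omega
      · simp [PySem.Set.mem_add, hex, hev] at hgoal ⊢
        omega

-- graph.length + 2 fuel is enough for A's loop
theorem loopA_suff (graph : List (Int × Int)) :
    ∀ (f : Nat) (v : PySem.Set Int) (r : List Int) (stack : List Int),
      stack.length + (graph.filter (fun e => decide (e.1 ∉ v))).length < f →
      (loopA (buildAdj graph) f (v, r) stack).isSome := by
  intro f
  induction f with
  | zero => intro v r stack h; omega
  | succ f ih =>
    intro v r stack h
    cases stack with
    | nil => simp [loopA]
    | cons x rest =>
      simp only [loopA]
      by_cases hx : x ∈ v
      · rw [if_pos hx]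
        exact ih v r rest (by simp at h ⊢; omega)
      · rw [if_neg hx]
        apply ih
        have hcnt := filter_visit_count graph v x hx
        have hlen : ((buildAdj graph).getD x []).length = (graph.filter (fun e => e.1 == x)).length := by
          rw [buildAdj_getD]; simp
        simp only [List.length_append, List.length_cons] at h ⊢
        omega

-- the visited-node universe, for B's fuel bound
def nodeUniv (graph : List (Int × Int)) (start : Int) : Finset Int :=
  (start :: graph.map Prod.snd).toFinset

-- graph.length + 2 fuel is enough for B's recursion
theorem dfsB_suff (graph : List (Int × Int)) (start : Int) :
    ∀ (f : Nat) (x : Int) (r : List Int),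
      x ∈ nodeUniv graph start →
      ((nodeUniv graph start).filter (fun y => y ∉ r)).card < f →
      ∃ r', dfsB f graph x r = some r' ∧ ∀ z ∈ r, z ∈ r' := by
  intro f
  induction f with
  | zero => intro x r _ h; omega
  | succ f ih =>
    intro x r hxS h
    by_cases hx : x ∈ r
    · exact ⟨r, by rw [dfsB_succ, if_pos hx], fun z hz => hz⟩
    · rw [dfsB_succ, if_neg hx]
      have hcard : ((nodeUniv graph start).filter (fun y => y ∉ r ++ [x])).card < f := by
        have heq : (nodeUniv graph start).filter (fun y => y ∉ r ++ [x])
            = ((nodeUniv graph start).filter (fun y => y ∉ r)).erase x := by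
          ext y
          simp [Finset.mem_erase, and_comm]
          tauto
        have hxmem : x ∈ (nodeUniv graph start).filter (fun y => y ∉ r) := by
          simp [hxS, hx]
        have hpos : 0 < ((nodeUniv graph start).filter (fun y => y ∉ r)).card :=
          Finset.card_pos.mpr ⟨x, hxmem⟩
        rw [heq, Finset.card_erase_of_mem hxmem]
        omega
      have hadjS : ∀ y ∈ (graph.filter (fun e => e.1 == x)).map Prod.snd,
          y ∈ nodeUniv graph start := by
        intro y hy
        simp only [List.mem_map] at hy
        obtain ⟨e, he, rfl⟩ := hy
        rw [nodeUniv, List.mem_toFinset]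
        exact List.mem_cons_of_mem _ (List.mem_map.mpr ⟨e, List.mem_of_mem_filter he, rfl⟩)
      have hnb : ∀ (l : List Int), (∀ y ∈ l, y ∈ nodeUniv graph start) →
          ∀ (r' : List Int),
          ((nodeUniv graph start).filter (fun y => y ∉ r')).card < f →
          ∃ r'', nbB graph f l (some r') = some r'' ∧ ∀ z ∈ r', z ∈ r'' := by
        intro l
        induction l with
        | nil => intro _ r' _; exact ⟨r', nbB_nil _ _ _, fun z hz => hz⟩
        | cons y ys ihl =>
          intro hlS r' hc
          obtain ⟨m, hm, hmono⟩ := ih y r' (hlS y (by simp)) hc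
          have hc'' : ((nodeUniv graph start).filter (fun z => z ∉ m)).card < f := by
            refine lt_of_le_of_lt (Finset.card_le_card ?_) hc
            intro z hz
            simp only [Finset.mem_filter] at hz ⊢
            exact ⟨hz.1, fun hzv => hz.2 (hmono z hzv)⟩
          obtain ⟨r'', hr'', hmono'⟩ := ihl (fun z hz => hlS z (by simp [hz])) m hc''
          refine ⟨r'', ?_, fun z hz => hmono' z (hmono z hz)⟩
          rw [nbB_cons]
          simp only [Option.bind_some]
          rw [hm]
          exact hr''
      obtain ⟨r', hr', hmono⟩ := hnb _ hadjS (r ++ [x]) hcard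
      exact ⟨r', hr', fun z hz => hmono z (by simp [hz])⟩

-- ===== VERDICT (by name: the statement is the Claim_ definition above) =====
theorem solution_spec : Claim_equal_solution := by
  intro graph start _
  unfold Spec_solution solution solution_alt
  have hA := loopA_suff graph (graph.length + 2) PySem.Set.empty [] [start]
    (by simp [PySem.Set.empty]
        have := List.length_filter_le (fun e : Int × Int => decide (e.1 ∉ ([] : List Int))) graph
        omega)
  have hB := dfsB_suff graph start (graph.length + 2) start []
    (by simp [nodeUniv])
    (by have h1 : ((nodeUniv graph start).filter (fun y => y ∉ ([] : List Int))).card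
          ≤ (nodeUniv graph start).card := Finset.card_filter_le _ _
        have h2 : (nodeUniv graph start).card ≤ (start :: graph.map Prod.snd).length :=
          List.toFinset_card_le _
        simp at h2
        omega)
  rcases hsA : loopA (buildAdj graph) (graph.length + 2) (PySem.Set.empty, []) [start] with _ | sA
  · rw [hsA] at hA; simp at hA
  · obtain ⟨rB, hrB, _⟩ := hB
    have hnbB : nbB graph (graph.length + 2) [start] (some []) = some rB := by
      rw [nbB_cons, Option.bind_some, hrB, nbB_nil]
    have heq := bridge graph (graph.length + 2) PySem.Set.empty [] [start]
      (graph.length + 2) sA rB (by simp [PySem.Set.empty]) hsA hnbB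
    obtain ⟨vA, rA⟩ := sA
    rw [hrB]
    simpa using heq
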